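-- pv_equiv track=rewrite | github.com/Almentoe/Euler-2 | EulerProgramPython/Euler38.py | mult_stack
-- ===== SOURCE A (Python) =====
-- def number_to_list(Number):
--     LIST = []
--     index = 0
--     Number = str(Number)
--     while index < len(Number):
--         LIST += [int(Number[index])]
--         index += 1
--     return LIST
--
-- def mult_stack(Number):
--     Stack = []
--     String = ""
--     j = 1
--     while j:
--         if len(Stack) < 9:
--             Stack += number_to_list(Number*j)
--             j += 1
--         else:
--             break
--     return Stack
-- ===== SOURCE B (Python) =====
-- def mult_stack(Number):
--     def build(j, need):
--         if need <= 0: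
--             return ""
--         piece = str(Number * j)
--         return piece + build(j + 1, need - len(piece))
--     return [int(c) for c in build(1, 9)]
-- ===== Notes on version B (the rewrite author's own statement) =====
-- stated objective: simpler
-- what changed: Replaces the iterative stack accumulator with a per-multiple digit-parsing helper by a recursive remaining-need builder of the concatenated decimal string plus one terminal digit-conversion pass.
import Mathlib
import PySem

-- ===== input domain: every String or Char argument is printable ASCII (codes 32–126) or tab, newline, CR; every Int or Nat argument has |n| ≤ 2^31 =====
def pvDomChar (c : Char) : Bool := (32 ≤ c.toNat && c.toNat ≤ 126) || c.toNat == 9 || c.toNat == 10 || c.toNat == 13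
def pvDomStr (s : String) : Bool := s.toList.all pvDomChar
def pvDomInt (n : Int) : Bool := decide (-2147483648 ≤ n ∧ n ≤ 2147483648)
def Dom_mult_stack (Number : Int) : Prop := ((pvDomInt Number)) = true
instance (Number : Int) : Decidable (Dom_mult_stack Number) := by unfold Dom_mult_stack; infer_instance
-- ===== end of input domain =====

-- B replaces A's iterative stack accumulator (with a per-multiple digit-parsing helper)
-- by a recursive remaining-need builder of the concatenated decimal string followed by
-- one terminal digit-conversion pass; objective: simpler.

-- int(c) for a one-character string c: exact via PySem.Int.ofStr? (none = ValueError;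
-- Pre_ excludes negative Number, the only case where a non-digit '-' is reached).
def pyIntChar (c : Char) : Int := (PySem.Int.ofStr? (String.mk [c])).getD 0

-- ===== PORT A =====
def number_to_list (Number : Int) : List Int :=
  -- the index-while over str(Number) is the fold appending int(Number[index]) per char
  (PySem.Int.toStr Number).toList.foldl (fun LIST c => LIST ++ [pyIntChar c]) []

-- the 'while j: if len(Stack) < 9 … else break' loop; fuel 9 only makes it total
-- (each iteration appends at least one digit, so 9 iterations always suffice)
def multLoopA (Number : Int) (fuel : Nat) (Stack : List Int) (j : Int) : List Int :=
  match fuel with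
  | 0 => Stack
  | fuel + 1 =>
    if Stack.length < 9 then
      multLoopA Number fuel (Stack ++ number_to_list (Number * j)) (j + 1)
    else Stack

def mult_stack (Number : Int) : List Int := multLoopA Number 9 [] 1

-- ===== PORT B =====
-- build(j, need): recursive remaining-need builder of the concatenated string (fuel = totality guard)
def buildB (Number : Int) (fuel : Nat) (j : Int) (need : Int) : List Char :=
  match fuel with
  | 0 => []
  | fuel + 1 =>
    if need ≤ 0 then []
    else
      let piece := (PySem.Int.toStr (Number * j)).toList
      piece ++ buildB Number fuel (j + 1) (need - piece.length)

def mult_stack_alt (Number : Int) : List Int :=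
  (buildB Number 9 1 9).map pyIntChar

-- ===== PRECONDITION & SPEC =====
-- A raises ValueError for Number < 0 (int('-') on the sign character); excluded.
def Pre_mult_stack (Number : Int) : Prop := 0 ≤ Number
instance (Number : Int) : Decidable (Pre_mult_stack Number) := by unfold Pre_mult_stack; infer_instance
def pvWitness_mult_stack : Int := (192)

def Spec_mult_stack (Number : Int) (out : List Int) : Prop := out = mult_stack_alt Number
instance (Number : Int) (out : List Int) : Decidable (Spec_mult_stack Number out) := by unfold Spec_mult_stack; infer_instance

-- ===== CLAIM (what is proved, stated in full; the proofs are below) =====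
def Claim_equal_mult_stack : Prop := ∀ (Number : Int), Dom_mult_stack Number → Pre_mult_stack Number → Spec_mult_stack Number (mult_stack Number)

-- ===== LEMMAS AND PROOFS =====

theorem foldl_append_singleton (f : Char → Int) (l : List Char) (acc : List Int) :
    l.foldl (fun LIST c => LIST ++ [f c]) acc = acc ++ l.map f := by
  induction l generalizing acc with
  | nil => simp
  | cons c l ih => simp [List.foldl, ih]

theorem number_to_list_eq_map (n : Int) :
    number_to_list n = (PySem.Int.toStr n).toList.map pyIntChar := by
  rw [number_to_list, foldl_append_singleton]; simp

theorem multLoopA_eq_buildB (Number : Int) (fuel : Nat) :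
    ∀ (j : Int) (S : List Int),
      multLoopA Number fuel S j = S ++ (buildB Number fuel j (9 - (S.length : Int))).map pyIntChar := by
  induction fuel with
  | zero => intro j S; simp [multLoopA, buildB]
  | succ fuel ih =>
    intro j S
    by_cases h : S.length < 9
    · have hneed : ¬ (9 - (S.length : Int) ≤ 0) := by omega
      rw [multLoopA, if_pos h, buildB, if_neg hneed, ih, number_to_list_eq_map]
      have : (9 - ((S ++ (PySem.Int.toStr (Number * j)).toList.map pyIntChar).length : Int))
           = 9 - (S.length : Int) - ((PySem.Int.toStr (Number * j)).toList.length : Int) := by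
        simp; omega
      rw [this]
      simp
    · have hneed : 9 - (S.length : Int) ≤ 0 := by omega
      rw [multLoopA, if_neg h, buildB, if_pos hneed]
      simp

-- ===== VERDICT (by name: the statement is the Claim_ definition above) =====
theorem mult_stack_spec : Claim_equal_mult_stack := by
  intro Number _ _
  unfold Spec_mult_stack mult_stack mult_stack_alt
  rw [multLoopA_eq_buildB]
  simp
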